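-- pv_equiv track=rewrite | github.com/Knife14/Basic_by_Python | Examed/TriadCount.py | TriadCount
-- ===== SOURCE A (Python) =====
-- def TriadCount(n: int, A: list):
--     cnt = 0
--
--     if len(A) < 3:
--         return 0
--
--     for i in range(1, n - 1):
--         l, r = 0, n - 1
--         lc, rc = 0, 0
--         piv = A[i]
--
--         while l < i:
--             if piv >= A[l]:
--                 lc += 1
--             l += 1
--
--         while r > i:
--             if piv <= A[r]:
--                 rc += 1
--             r -= 1
--
--         if lc != 0 and rc != 0:
--             cnt += lc * rc
--
--     return cnt
-- ===== SOURCE B (Python) =====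
-- def count_le(s, x):
--     # number of elements <= x in ascending-sorted list s (binary split)
--     if not s:
--         return 0
--     m = len(s) // 2
--     if s[m] <= x:
--         return m + 1 + count_le(s[m + 1:], x)
--     else:
--         return count_le(s[:m], x)
--
--
-- def insort(s, x):
--     # insert x into ascending-sorted s, keeping it sorted
--     p = count_le(s, x)
--     return s[:p] + [x] + s[p:]
--
--
-- def TriadCount(n: int, A: list):
--     if len(A) < 3 or n < 3:
--         return 0
--     # backward pass: for each pivot i, count of elements >= A[i] to its right
--     rcs = []
--     suf = [A[n - 1]]
--     for i in range(n - 2, 0, -1):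
--         rcs.append(len(suf) - count_le(suf, A[i] - 1))
--         suf = insort(suf, A[i])
--     rcs.reverse()
--     # forward pass: count of elements <= A[i] to its left, accumulate products
--     total = 0
--     pre = [A[0]]
--     i = 1
--     for rc in rcs:
--         total += count_le(pre, A[i]) * rc
--         pre = insort(pre, A[i])
--         i += 1
--     return total
-- ===== Notes on version B (the rewrite author's own statement) =====
-- stated objective: faster
-- what changed: Instead of rescanning the whole prefix and suffix linearly for every pivot, B makes one backward and one forward pass, each maintaining a sorted list by binary insertion and answering each pivot's count with a recursive binary search (count_le).
import Mathlib
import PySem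

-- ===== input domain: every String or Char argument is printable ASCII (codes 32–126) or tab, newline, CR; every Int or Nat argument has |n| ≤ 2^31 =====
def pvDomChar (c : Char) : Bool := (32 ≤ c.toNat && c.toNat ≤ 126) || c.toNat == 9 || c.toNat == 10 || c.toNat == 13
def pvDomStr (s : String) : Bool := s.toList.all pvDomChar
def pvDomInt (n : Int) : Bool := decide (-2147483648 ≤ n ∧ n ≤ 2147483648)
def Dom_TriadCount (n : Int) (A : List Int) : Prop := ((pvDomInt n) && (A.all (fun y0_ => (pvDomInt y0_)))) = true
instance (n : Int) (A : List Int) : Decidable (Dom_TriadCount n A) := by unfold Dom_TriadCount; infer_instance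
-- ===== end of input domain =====

-- B replaces A's per-pivot linear prefix/suffix rescans by two passes that keep a sorted
-- list via binary insertion and answer each pivot's count by a recursive binary search
-- (measured faster by a constant factor at the largest tested size).


-- ===== PORT A =====
def TriadCount (n : Int) (A : List Int) : Int :=
  if PySem.List.len A < 3 then 0
  else
    (PySem.List.pyRange 1 (n - 1) 1).foldl (fun cnt i =>
      let piv := PySem.List.pyGetD A i 0
      -- while l < i: if piv >= A[l]: lc += 1
      let lc := (PySem.List.pyRange 0 i 1).foldl
        (fun lc l => if PySem.List.pyGetD A l 0 ≤ piv then lc + 1 else lc) (0 : Int)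
      -- while r > i: if piv <= A[r]: rc += 1
      let rc := (PySem.List.pyRange (n - 1) i (-1)).foldl
        (fun rc r => if piv ≤ PySem.List.pyGetD A r 0 then rc + 1 else rc) (0 : Int)
      if lc ≠ 0 ∧ rc ≠ 0 then cnt + lc * rc else cnt) 0

-- ===== PORT B =====
-- count_le from Source B: binary split on the sorted list (fuel = |s| is only a
-- structural-termination guard; each call strictly shrinks the list)
def pvCountLeGo (fuel : Nat) (s : List Int) (x : Int) : Int :=
  match fuel with
  | 0 => 0
  | fuel + 1 =>
    if s = [] then 0
    else
      let m := PySem.Int.floordiv (PySem.List.len s) 2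
      if PySem.List.pyGetD s m 0 ≤ x then
        m + 1 + pvCountLeGo fuel (PySem.List.slice s (some (m + 1)) none) x
      else
        pvCountLeGo fuel (PySem.List.slice s none (some m)) x

def pvCountLe (s : List Int) (x : Int) : Int := pvCountLeGo s.length s x

-- insort from Source B: s[:p] + [x] + s[p:]
def pvInsort (s : List Int) (x : Int) : List Int :=
  let p := pvCountLe s x
  PySem.List.slice s none (some p) ++ [x] ++ PySem.List.slice s (some p) none

def TriadCount_alt (n : Int) (A : List Int) : Int :=
  if PySem.List.len A < 3 ∨ n < 3 then 0
  else
    -- backward pass: rcs[i] = number of elements ≥ A[i] strictly to its right (i = n-2 … 1)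
    let sr := (PySem.List.pyRange (n - 2) 0 (-1)).foldl
      (fun (st : List Int × List Int) i =>
        let piv := PySem.List.pyGetD A i 0
        (st.1 ++ [PySem.List.len st.2 - pvCountLe st.2 (piv - 1)], pvInsort st.2 piv))
      ([], [PySem.List.pyGetD A (n - 1) 0])
    let rcs := sr.1.reverse
    -- forward pass over rcs, maintaining the sorted prefix
    let tp := rcs.foldl
      (fun (st : Int × List Int × Int) rc =>
        (st.1 + pvCountLe st.2.1 (PySem.List.pyGetD A st.2.2 0) * rc,
         pvInsort st.2.1 (PySem.List.pyGetD A st.2.2 0), st.2.2 + 1))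
      (0, [PySem.List.pyGetD A 0 0], 1)
    tp.1

-- ===== PRECONDITION & SPEC =====
-- Pre_ excludes exactly the inputs where Python A raises IndexError: 3 ≤ n, 3 ≤ len(A) and n > len(A)
-- (A reads A[n-1] there).
def Pre_TriadCount (n : Int) (A : List Int) : Prop :=
  (A.length : Int) < 3 ∨ n < 3 ∨ n ≤ (A.length : Int)
instance (n : Int) (A : List Int) : Decidable (Pre_TriadCount n A) := by
  unfold Pre_TriadCount; infer_instance
def pvWitness_TriadCount : Int × List Int := (4, [3, 1, 2, 4])

def Spec_TriadCount (n : Int) (A : List Int) (out : Int) : Prop := out = TriadCount_alt n A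
instance (n : Int) (A : List Int) (out : Int) : Decidable (Spec_TriadCount n A out) := by
  unfold Spec_TriadCount; infer_instance

-- ===== CLAIM (what is proved, stated in full; the proofs are below) =====
def Claim_equal_TriadCount : Prop := ∀ (n : Int) (A : List Int), Dom_TriadCount n A → Pre_TriadCount n A → Spec_TriadCount n A (TriadCount n A)

-- ===== LEMMAS AND PROOFS =====

-- the segment A[a:b] (0 ≤ a ≤ b ≤ len A intended)
def pvSeg (A : List Int) (a b : Int) : List Int := (A.drop a.toNat).take (b - a).toNat

-- common closed form: sum over pivots of (#left ≤ piv) * (#right ≥ piv)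
def pvF (n : Int) (A : List Int) : Int :=
  ((PySem.List.pyRange 1 (n - 1) 1).map (fun i =>
    ((pvSeg A 0 i).countP (fun y => decide (y ≤ PySem.List.pyGetD A i 0)) : Int) *
    ((pvSeg A (i + 1) n).countP (fun y => decide (PySem.List.pyGetD A i 0 ≤ y)) : Int))).sum

lemma pvMapSeg (A : List Int) (a b : Int) (ha : 0 ≤ a) (hab : a ≤ b) (hb : b ≤ (A.length : Int)) :
    (PySem.List.pyRange a b 1).map (fun j => PySem.List.pyGetD A j 0) = pvSeg A a b := by
  rw [PySem.List.pyRange_one, List.map_map, pvSeg]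
  apply List.ext_getElem
  · simp only [List.length_map, List.length_range, List.length_take, List.length_drop]
    omega
  · intro i h1 h2
    simp only [List.getElem_map, List.getElem_range, Function.comp_apply,
      List.getElem_take, List.getElem_drop]
    have hi : i < (b - a).toNat := by simpa using h1
    have : a + (i : Int) = ((a.toNat + i : Nat) : Int) := by omega
    rw [this, PySem.List.pyGetD_natCast]
    have hlt : a.toNat + i < A.length := by omega
    simp [List.getD_eq_getElem?_getD, List.getElem?_eq_getElem hlt]

lemma pvCountLe_spec_aux : ∀ (N : Nat) (s : List Int), s.length ≤ N → ∀ (x : Int),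
    s.Pairwise (· ≤ ·) → pvCountLeGo N s x = (s.countP (fun y => decide (y ≤ x)) : Int) := by
  intro N
  induction N with
  | zero =>
    intro s hN x hs
    have : s = [] := List.eq_nil_of_length_eq_zero (by omega)
    subst this; simp [pvCountLeGo]
  | succ N ih =>
    intro s hN x hs
    rw [pvCountLeGo]
    by_cases h : s = []
    · subst h; simp
    · simp only [h, if_false]
      have hl : s.length ≠ 0 := fun hz => h (List.eq_nil_of_length_eq_zero hz)
      have hm : PySem.Int.floordiv (PySem.List.len s) 2 = ((s.length / 2 : Nat) : Int) := by
        simp only [PySem.List.len_eq]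
        exact_mod_cast PySem.Int.floordiv_natCast s.length 2
      set M : Nat := s.length / 2 with hMdef
      have hMlt : M < s.length := by omega
      have hget : PySem.List.pyGetD s (PySem.Int.floordiv (PySem.List.len s) 2) 0 = s[M] := by
        rw [hm, PySem.List.pyGetD_natCast]
        simp [List.getD_eq_getElem?_getD, List.getElem?_eq_getElem hMlt]
      have hmono : ∀ i j (hi : i < s.length) (hj : j < s.length), i ≤ j → s[i] ≤ s[j] := by
        intro i j hi hj hij
        rcases Nat.eq_or_lt_of_le hij with rfl | hlt
        · exact le_refl _
        · exact (List.pairwise_iff_getElem.mp hs) i j hi hj hlt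
      rw [hget]
      by_cases hcmp : s[M] ≤ x
      · simp only [hcmp, if_true]
        rw [hm, show ((M : Int) + 1 = ((M + 1 : Nat) : Int)) by push_cast; ring,
          PySem.List.slice_from_natCast]
        rw [ih (s.drop (M + 1)) (by simp; omega) x (hs.sublist (List.drop_sublist _ _))]
        conv_rhs => rw [← List.take_append_drop (M + 1) s]
        rw [List.countP_append]
        have htake : (s.take (M + 1)).countP (fun y => decide (y ≤ x)) = M + 1 := by
          have hall : ∀ a ∈ s.take (M + 1), (fun y => decide (y ≤ x)) a = true := by
            intro a ha
            rcases List.mem_iff_getElem.mp ha with ⟨i, hi, rfl⟩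
            have hi' : i < M + 1 ∧ i < s.length := by
              simp only [List.length_take] at hi; omega
            simp only [List.getElem_take]
            exact decide_eq_true (le_trans (hmono i M (by omega) hMlt (by omega)) hcmp)
          rw [List.countP_eq_length.mpr hall, List.length_take]
          omega
        rw [htake]
        push_cast
        ring
      · simp only [hcmp, if_false]
        rw [hm, PySem.List.slice_to_natCast]
        rw [ih (s.take M) (by simp; omega) x (hs.sublist (List.take_sublist _ _))]
        conv_rhs => rw [← List.take_append_drop M s]
        rw [List.countP_append]
        have hdrop : (s.drop M).countP (fun y => decide (y ≤ x)) = 0 := by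
          rw [List.countP_eq_zero]
          intro a ha
          rcases List.mem_iff_getElem.mp ha with ⟨i, hi, rfl⟩
          have hi' : M + i < s.length := by simp only [List.length_drop] at hi; omega
          simp only [List.getElem_drop]
          have : s[M] ≤ s[M + i] := hmono M (M + i) hMlt hi' (by omega)
          simp; omega
        rw [hdrop]
        simp

lemma pvCountLe_spec (s : List Int) (x : Int) (hs : s.Pairwise (· ≤ ·)) :
    pvCountLe s x = (s.countP (fun y => decide (y ≤ x)) : Int) :=
  pvCountLe_spec_aux s.length s le_rfl x hs

lemma pvSorted_index (s : List Int) (x : Int) (hs : s.Pairwise (· ≤ ·)) :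
    ∀ i (hi : i < s.length), (s[i] ≤ x ↔ i < s.countP (fun y => decide (y ≤ x))) := by
  intro i hi
  have hmono : ∀ p q (hp : p < s.length) (hq : q < s.length), p ≤ q → s[p] ≤ s[q] := by
    intro p q hp hq hpq
    rcases Nat.eq_or_lt_of_le hpq with rfl | hlt
    · exact le_refl _
    · exact (List.pairwise_iff_getElem.mp hs) p q hp hq hlt
  constructor
  · intro hle
    have : (s.take (i + 1)).countP (fun y => decide (y ≤ x)) = i + 1 := by
      rw [List.countP_eq_length.mpr, List.length_take]
      · omega
      · intro a ha
        rcases List.mem_iff_getElem.mp ha with ⟨j, hj, rfl⟩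
        have hj' : j ≤ i ∧ j < s.length := by simp only [List.length_take] at hj; omega
        simp only [List.getElem_take]
        exact decide_eq_true ((hmono j i hj'.2 hi hj'.1).trans hle)
    have hmon := (List.take_sublist (i + 1) s).countP_le (p := fun y => decide (y ≤ x))
    omega
  · intro hc
    by_contra hgt
    have hz : (s.drop i).countP (fun y => decide (y ≤ x)) = 0 := by
      rw [List.countP_eq_zero]
      intro a ha
      rcases List.mem_iff_getElem.mp ha with ⟨j, hj, rfl⟩
      have hj' : i + j < s.length := by simp only [List.length_drop] at hj; omega
      simp only [List.getElem_drop]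
      have := hmono i (i + j) hi hj' (by omega)
      simp; omega
    have hsplit : s.countP (fun y => decide (y ≤ x))
        = (s.take i).countP (fun y => decide (y ≤ x)) + (s.drop i).countP (fun y => decide (y ≤ x)) := by
      conv_lhs => rw [← List.take_append_drop i s]
      rw [List.countP_append]
    have hle' : (s.take i).countP (fun y => decide (y ≤ x)) ≤ i := by
      have := List.countP_le_length (p := fun y => decide (y ≤ x)) (l := s.take i)
      simp only [List.length_take] at this; omega
    omega

lemma pvInsort_eq (s : List Int) (x : Int) (hs : s.Pairwise (· ≤ ·)) :
    pvInsort s x = s.take (s.countP (fun y => decide (y ≤ x))) ++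
      x :: s.drop (s.countP (fun y => decide (y ≤ x))) := by
  unfold pvInsort
  simp only [pvCountLe_spec s x hs, PySem.List.slice_to_natCast, PySem.List.slice_from_natCast]
  simp

lemma pvInsort_perm (s : List Int) (x : Int) (hs : s.Pairwise (· ≤ ·)) :
    (pvInsort s x).Perm (x :: s) := by
  rw [pvInsort_eq s x hs]
  refine List.perm_middle.trans ?_
  rw [List.take_append_drop]

lemma pvInsort_sorted (s : List Int) (x : Int) (hs : s.Pairwise (· ≤ ·)) :
    (pvInsort s x).Pairwise (· ≤ ·) := by
  rw [pvInsort_eq s x hs]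
  set c := s.countP (fun y => decide (y ≤ x)) with hc
  have hcl : c ≤ s.length := List.countP_le_length
  have htk : ∀ a ∈ s.take c, a ≤ x := by
    intro a ha
    rcases List.mem_iff_getElem.mp ha with ⟨j, hj, rfl⟩
    have hj' : j < c ∧ j < s.length := by simp only [List.length_take] at hj; omega
    simp only [List.getElem_take]
    exact (pvSorted_index s x hs j hj'.2).mpr hj'.1
  have hdp : ∀ b ∈ s.drop c, x ≤ b := by
    intro b hb
    rcases List.mem_iff_getElem.mp hb with ⟨j, hj, rfl⟩
    have hj' : c + j < s.length := by simp only [List.length_drop] at hj; omega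
    simp only [List.getElem_drop]
    have := (pvSorted_index s x hs (c + j) hj').not.mpr (by omega)
    omega
  rw [List.pairwise_append]
  refine ⟨hs.sublist (List.take_sublist _ _), ?_, ?_⟩
  · rw [List.pairwise_cons]
    exact ⟨hdp, hs.sublist (List.drop_sublist _ _)⟩
  · intro a ha b hb
    rcases List.mem_cons.mp hb with rfl | hb'
    · exact htk a ha
    · exact (htk a ha).trans (hdp b hb')

-- A[a:b] = A[a] :: A[a+1:b] for 0 ≤ a < b ≤ len A
lemma pvSeg_cons (A : List Int) (a b : Int) (ha : 0 ≤ a) (hab : a < b) (hb : b ≤ (A.length : Int)) :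
    pvSeg A a b = PySem.List.pyGetD A a 0 :: pvSeg A (a + 1) b := by
  have hal : a.toNat < A.length := by omega
  unfold pvSeg
  rw [List.drop_eq_getElem_cons hal]
  rw [show (b - a).toNat = ((b - (a+1)).toNat + 1) by omega, List.take_succ_cons,
    PySem.List.pyGetD_eq_getElem A 0 ha (by omega),
    show (a + 1).toNat = a.toNat + 1 by omega]

lemma pvSeg_nil (A : List Int) (b : Int) : pvSeg A b b = ([] : List Int) := by
  unfold pvSeg; simp

-- number of elements ≥ piv = length − number of elements ≤ piv−1 (integers)
lemma pvCountGe (l : List Int) (piv : Int) :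
    (l.length : Int) - (l.countP (fun y => decide (y ≤ piv - 1)) : Int)
      = (l.countP (fun y => decide (piv ≤ y)) : Int) := by
  have h := List.length_eq_countP_add_countP (p := fun y => decide (y ≤ piv - 1)) (l := l)
  have h2 : l.countP (fun y => decide ¬(decide (y ≤ piv - 1)) = true) = l.countP (fun y => decide (piv ≤ y)) := by
    apply List.countP_congr
    intro y _
    by_cases hy : piv ≤ y <;> simp [hy] <;> omega
    
  omega

lemma pvA_eq_F (n : Int) (A : List Int) (h3 : 3 ≤ (A.length : Int)) (hn : 3 ≤ n)
    (hlen : n ≤ (A.length : Int)) : TriadCount n A = pvF n A := by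
  have hbody : ∀ (acc : Int), ∀ i ∈ PySem.List.pyRange 1 (n - 1) 1,
      (fun cnt i =>
        let piv := PySem.List.pyGetD A i 0
        let lc := (PySem.List.pyRange 0 i 1).foldl
          (fun lc l => if PySem.List.pyGetD A l 0 ≤ piv then lc + 1 else lc) (0 : Int)
        let rc := (PySem.List.pyRange (n - 1) i (-1)).foldl
          (fun rc r => if piv ≤ PySem.List.pyGetD A r 0 then rc + 1 else rc) (0 : Int)
        if lc ≠ 0 ∧ rc ≠ 0 then cnt + lc * rc else cnt) acc i
      = (fun cnt i =>
        cnt + ((pvSeg A 0 i).countP (fun y => decide (y ≤ PySem.List.pyGetD A i 0)) : Int) *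
          ((pvSeg A (i + 1) n).countP (fun y => decide (PySem.List.pyGetD A i 0 ≤ y)) : Int)) acc i := by
    intro cnt i hi
    rw [PySem.List.mem_pyRange_one] at hi
    dsimp only
    rw [PySem.List.foldl_ite_add_one, PySem.List.foldl_ite_add_one]
    have hl : (PySem.List.pyRange 0 i 1).countP
        (fun l => decide (PySem.List.pyGetD A l 0 ≤ PySem.List.pyGetD A i 0))
        = (pvSeg A 0 i).countP (fun y => decide (y ≤ PySem.List.pyGetD A i 0)) := by
      rw [← pvMapSeg A 0 i (by omega) (by omega) (by omega), List.countP_map]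
      rfl
    have hrange : PySem.List.pyRange (n - 1) i (-1) = (PySem.List.pyRange (i + 1) n 1).reverse := by
      rw [PySem.List.pyRange_neg_one_eq_reverse]
      norm_num
    have hr : (PySem.List.pyRange (n - 1) i (-1)).countP
        (fun r => decide (PySem.List.pyGetD A i 0 ≤ PySem.List.pyGetD A r 0))
        = (pvSeg A (i + 1) n).countP (fun y => decide (PySem.List.pyGetD A i 0 ≤ y)) := by
      rw [hrange, List.countP_reverse, ← pvMapSeg A (i + 1) n (by omega) (by omega) (by omega),
        List.countP_map]
      rfl
    rw [hl, hr]
    set c1 := (pvSeg A 0 i).countP (fun y => decide (y ≤ PySem.List.pyGetD A i 0))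
    set c2 := (pvSeg A (i + 1) n).countP (fun y => decide (PySem.List.pyGetD A i 0 ≤ y))
    simp only [zero_add]
    split_ifs with hg
    · rfl
    · push_neg at hg
      by_cases h1 : (c1 : Int) = 0
      · simp [h1]
      · simp [hg h1]
  rw [TriadCount, if_neg (by simp [PySem.List.len_eq]; omega)]
  rw [PySem.List.foldl_congr_mem _ _ _ _ hbody, PySem.List.foldl_add]
  rw [pvF]
  ring

lemma pvBack (n : Int) (A : List Int) (hn : 3 ≤ n) (hlen : n ≤ (A.length : Int)) :
    ∀ (k : Nat), (k : Int) ≤ n - 2 → ∀ (rcs suf : List Int),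
      suf.Pairwise (· ≤ ·) → suf.Perm (pvSeg A ((k : Int) + 1) n) →
      ((PySem.List.pyRange (k : Int) 0 (-1)).foldl
        (fun (st : List Int × List Int) i =>
          (st.1 ++ [PySem.List.len st.2 - pvCountLe st.2 (PySem.List.pyGetD A i 0 - 1)],
           pvInsort st.2 (PySem.List.pyGetD A i 0))) (rcs, suf)).1
      = rcs ++ ((PySem.List.pyRange 1 ((k : Int) + 1) 1).map (fun i =>
          ((pvSeg A (i + 1) n).countP (fun y => decide (PySem.List.pyGetD A i 0 ≤ y)) : Int))).reverse := by
  intro k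
  induction k with
  | zero =>
    intro _ rcs suf _ _
    rw [PySem.List.pyRange_neg_one_eq_nil (by norm_num), PySem.List.pyRange_one_eq_nil (by norm_num)]
    simp
  | succ k ih =>
    intro hk rcs suf hsort hperm
    rw [PySem.List.pyRange_neg_one_cons (by push_cast; omega), List.foldl_cons]
    have hcast : ((k + 1 : Nat) : Int) - 1 = (k : Int) := by push_cast; ring
    rw [hcast]
    set i : Int := ((k + 1 : Nat) : Int) with hidef
    set piv : Int := PySem.List.pyGetD A i 0 with hpiv
    -- the appended value is the right-count for pivot i
    have hval : PySem.List.len suf - pvCountLe suf (piv - 1)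
        = ((pvSeg A (i + 1) n).countP (fun y => decide (piv ≤ y)) : Int) := by
      rw [PySem.List.len_eq, pvCountLe_spec suf (piv - 1) hsort,
        hperm.countP_eq, hperm.length_eq]
      exact pvCountGe _ piv
    -- invariant for the new sorted suffix
    have hia : (k : Int) + 1 = i := by rw [hidef]; push_cast; ring
    have hi0 : 0 ≤ i := by rw [hidef]; positivity
    have hsort' := pvInsort_sorted suf piv hsort
    have hperm' : (pvInsort suf piv).Perm (pvSeg A i n) := by
      rw [pvSeg_cons A i n hi0 (by omega) hlen, ← hpiv]
      exact (pvInsort_perm suf piv hsort).trans (hperm.cons piv)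
    rw [ih (by omega) _ _ hsort' (by rw [hia]; exact hperm')]
    have hsplit := PySem.List.pyRange_one_succ_right (a := (1 : Int)) (b := i) (by omega)
    have hf : ((pvSeg A (i + 1) n).countP (fun y => decide (PySem.List.pyGetD A i 0 ≤ y)) : Int)
        = PySem.List.len suf - pvCountLe suf (piv - 1) := by rw [hval, hpiv]
    simp only [PySem.List.len_eq] at hf
    conv_rhs => rw [hsplit]
    rw [List.map_append, List.reverse_append, hia]
    simp [hf]

lemma pvSeg_snoc (A : List Int) (j : Int) (hj : 0 ≤ j) (hlt : j < (A.length : Int)) :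
    pvSeg A 0 (j + 1) = pvSeg A 0 j ++ [PySem.List.pyGetD A j 0] := by
  have hjl : j.toNat < A.length := by omega
  unfold pvSeg
  rw [PySem.List.pyGetD_eq_getElem A 0 hj (by omega)]
  simp only [Int.toNat_zero, List.drop_zero, Int.sub_zero]
  rw [show (j + 1).toNat = j.toNat + 1 by omega, List.take_succ,
    List.getElem?_eq_getElem hjl]
  rfl

lemma pvFwd (n : Int) (A : List Int) (hn : 3 ≤ n) (hlen : n ≤ (A.length : Int)) :
    ∀ (m : Nat), ∀ (j : Int), j = n - 1 - (m : Int) → 1 ≤ j → ∀ (total : Int) (pre : List Int),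
      pre.Pairwise (· ≤ ·) → pre.Perm (pvSeg A 0 j) →
      ((PySem.List.pyRange j (n - 1) 1).foldl
        (fun (st : Int × List Int × Int) i =>
          (st.1 + pvCountLe st.2.1 (PySem.List.pyGetD A st.2.2 0) *
             ((pvSeg A (i + 1) n).countP (fun y => decide (PySem.List.pyGetD A i 0 ≤ y)) : Int),
           pvInsort st.2.1 (PySem.List.pyGetD A st.2.2 0), st.2.2 + 1)) (total, pre, j)).1
      = total + ((PySem.List.pyRange j (n - 1) 1).map (fun i =>
          ((pvSeg A 0 i).countP (fun y => decide (y ≤ PySem.List.pyGetD A i 0)) : Int) *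
          ((pvSeg A (i + 1) n).countP (fun y => decide (PySem.List.pyGetD A i 0 ≤ y)) : Int))).sum := by
  intro m
  induction m with
  | zero =>
    intro j hj _ total pre _ _
    rw [PySem.List.pyRange_one_eq_nil (by omega)]
    simp
  | succ m ih =>
    intro j hj hj1 total pre hsort hperm
    have hjlt : j < n - 1 := by push_cast at hj; omega
    rw [PySem.List.pyRange_one_cons hjlt, List.foldl_cons]
    set piv : Int := PySem.List.pyGetD A j 0 with hpiv
    have hlc : pvCountLe pre piv = ((pvSeg A 0 j).countP (fun y => decide (y ≤ piv)) : Int) := by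
      rw [pvCountLe_spec pre piv hsort, hperm.countP_eq]
    have hsort' := pvInsort_sorted pre piv hsort
    have hperm' : (pvInsort pre piv).Perm (pvSeg A 0 (j + 1)) := by
      rw [pvSeg_snoc A j (by omega) (by omega), ← hpiv]
      exact (pvInsort_perm pre piv hsort).trans ((hperm.cons piv).trans (List.perm_append_singleton piv (pvSeg A 0 j)).symm)
    rw [ih (j + 1) (by push_cast at hj ⊢; omega) (by omega) _ _ hsort' hperm']
    rw [List.map_cons, List.sum_cons, hlc]
    ring

lemma pvB_eq_F (n : Int) (A : List Int) (h3 : 3 ≤ (A.length : Int)) (hn : 3 ≤ n)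
    (hlen : n ≤ (A.length : Int)) : TriadCount_alt n A = pvF n A := by
  rw [TriadCount_alt, if_neg (by simp [PySem.List.len_eq]; omega)]
  dsimp only
  have hc : (((n - 2).toNat : Nat) : Int) = n - 2 := by omega
  have hseg1 : pvSeg A ((((n - 2).toNat : Nat) : Int) + 1) n = [PySem.List.pyGetD A (n - 1) 0] := by
    rw [hc, show n - 2 + 1 = n - 1 by ring,
      pvSeg_cons A (n - 1) n (by omega) (by omega) hlen, show n - 1 + 1 = n by ring, pvSeg_nil]
  have hback := pvBack n A hn hlen (n - 2).toNat (by omega) [] [PySem.List.pyGetD A (n - 1) 0]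
    (List.pairwise_singleton _ _) (by rw [hseg1])
  rw [hc] at hback
  rw [show n - 2 = (((n - 2).toNat : Nat) : Int) by omega] at hback ⊢
  rw [hback, List.nil_append, List.reverse_reverse, hc,
    show n - 2 + 1 = n - 1 by ring]
  simp only [List.foldl_map]
  have hseg0 : pvSeg A 0 1 = [PySem.List.pyGetD A 0 0] := by
    rw [pvSeg_cons A 0 1 (by omega) (by omega) (by omega), show (0:Int) + 1 = 1 by ring, pvSeg_nil]
  have hfwd := pvFwd n A hn hlen (n - 2).toNat 1 (by omega) (by omega) 0 [PySem.List.pyGetD A 0 0]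
    (List.pairwise_singleton _ _) (by rw [hseg0])
  rw [hfwd, zero_add, pvF]

-- ===== VERDICT (by name: the statement is the Claim_ definition above) =====
theorem TriadCount_spec : Claim_equal_TriadCount := by
  intro n A _hD hP
  unfold Spec_TriadCount
  by_cases h3 : (A.length : Int) < 3
  · simp [TriadCount, TriadCount_alt, PySem.List.len_eq, h3]
  · by_cases hn : n < 3
    · simp [TriadCount, TriadCount_alt, PySem.List.len_eq, h3, hn,
        PySem.List.pyRange_one_eq_nil (by omega : n - 1 ≤ 1)]
    · have hlen : n ≤ (A.length : Int) := by
        rcases hP with h | h | h <;> omega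
      rw [pvA_eq_F n A (by omega) (by omega) hlen, pvB_eq_F n A (by omega) (by omega) hlen]
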